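-- pv_equiv track=rewrite | github.com/svend4/meta | projects/hexglyph/solan_phase.py | phase_offset
-- ===== SOURCE A (Python) =====
-- def series_match(si: list[int], sj: list[int], offset: int) -> bool:
--     """True iff sj[t] == si[(t + offset) % P] for all t."""
--     P = len(si)
--     if P == 0 or len(sj) != P:
--         return False
--     return all(sj[t] == si[(t + offset) % P] for t in range(P))
--
-- def phase_offset(si: list[int], sj: list[int]) -> int | None:
--     """
--     Minimum non-negative offset k such that sj is a k-circular-shift of si.
--     Returns None if no such k exists (series not phase-synchronized).
--     """
--     P = len(si)
--     if P == 0 or len(sj) != P: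
--         return None
--     for k in range(P):
--         if series_match(si, sj, k):
--             return k
--     return None
-- ===== SOURCE B (Python) =====
-- def phase_offset(si: list[int], sj: list[int]) -> int | None:
--     """
--     Minimum non-negative offset k such that sj is a k-circular-shift of si.
--     KMP search for sj inside si+si (truncated to 2P-1 so starts stay < P):
--     the first occurrence start is exactly the minimal offset.  O(P) time.
--     """
--     P = len(si)
--     if P == 0 or len(sj) != P:
--         return None
--     # failure table: fail[i] = length of the longest proper border of sj[:i+1]
--     fail = [0] * P
--     k = 0
--     for i in range(1, P):
--         while k > 0 and sj[i] != sj[k]: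
--             k = fail[k - 1]
--         if sj[i] == sj[k]:
--             k += 1
--         fail[i] = k
--     # scan the text; a full match ending at index i starts at i - P + 1 < P
--     text = si + si[:P - 1]
--     k = 0
--     for i, x in enumerate(text):
--         while k > 0 and x != sj[k]:
--             k = fail[k - 1]
--         if x == sj[k]:
--             k += 1
--         if k == P:
--             return i - P + 1
--     return None
-- ===== Notes on version B (the rewrite author's own statement) =====
-- stated objective: faster
-- what changed: B replaces A's brute-force scan (try every offset k and recheck all P positions with modular indexing via the series_match helper) by a Knuth-Morris-Pratt search: it builds the failure table of sj and scans si+si (truncated to 2P-1) once, returning the first full-match start, which is the minimal rotation offset.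
import Mathlib
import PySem

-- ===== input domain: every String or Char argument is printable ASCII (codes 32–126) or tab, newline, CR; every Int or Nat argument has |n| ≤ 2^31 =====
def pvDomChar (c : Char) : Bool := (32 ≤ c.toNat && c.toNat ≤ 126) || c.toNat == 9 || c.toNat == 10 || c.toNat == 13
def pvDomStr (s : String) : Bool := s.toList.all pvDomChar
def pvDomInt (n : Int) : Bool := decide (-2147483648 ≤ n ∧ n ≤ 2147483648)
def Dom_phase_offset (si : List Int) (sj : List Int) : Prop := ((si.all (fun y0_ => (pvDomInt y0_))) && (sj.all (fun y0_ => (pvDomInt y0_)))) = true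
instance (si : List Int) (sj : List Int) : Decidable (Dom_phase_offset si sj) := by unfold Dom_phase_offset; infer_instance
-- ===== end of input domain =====

-- B replaces A's quadratic try-every-offset modular scan by a linear KMP (failure-table)
-- search for sj inside si+si truncated to length 2P-1; first match start = minimal offset.

-- ===== PORT A =====
def series_match (si : List Int) (sj : List Int) (offset : Int) : Bool :=
  let P : Int := si.length
  if P = 0 ∨ (sj.length : Int) ≠ P then false
  else
    (PySem.List.pyRange 0 P 1).all (fun t =>
      PySem.List.pyGetD sj t 0 == PySem.List.pyGetD si (PySem.Int.mod (t + offset) P) 0)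

def phaseLoopA (si : List Int) (sj : List Int) : List Int → Option Int
  | [] => none
  | k :: ks => if series_match si sj k then some k else phaseLoopA si sj ks

def phase_offset (si : List Int) (sj : List Int) : Option Int :=
  let P : Int := si.length
  if P = 0 ∨ (sj.length : Int) ≠ P then none
  else phaseLoopA si sj (PySem.List.pyRange 0 P 1)

-- ===== PORT B =====
-- the `while k>0 and c != pat[k]` descent followed by the `if c == pat[k]: k += 1` increment;
-- the inner `if h : k' < k` guard only makes the loop total (with the real failure table fail[k-1] < k always)
def kmpStep (pat : List Int) (fail : List Nat) (c : Int) (k : Nat) : Nat :=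
  if k ≠ 0 ∧ c ≠ pat.getD k 0 then
    let k' := fail.getD (k - 1) 0
    if _h : k' < k then kmpStep pat fail c k'
    else 0
  else if c = pat.getD k 0 then k + 1 else k
termination_by k

-- loop body of the failure-table construction: fail[i] = k after one step
def buildStep (pat : List Int) (acc : List Nat × Nat) (i : Nat) : List Nat × Nat :=
  let k := kmpStep pat acc.1 (pat.getD i 0) acc.2
  (acc.1.set i k, k)

def buildFail (pat : List Int) : List Nat :=
  ((List.range' 1 (pat.length - 1)).foldl (buildStep pat) (List.replicate pat.length 0, 0)).1

-- `for i, x in enumerate(text)` ported as structural recursion carrying the index i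
def kmpRun (pat : List Int) (fail : List Nat) : List Int → Nat → Nat → Option Int
  | [], _, _ => none
  | x :: rest, i, k =>
    let k' := kmpStep pat fail x k
    if k' = pat.length then some ((i : Int) - (pat.length : Int) + 1)
    else kmpRun pat fail rest (i + 1) k'

def phase_offset_alt (si : List Int) (sj : List Int) : Option Int :=
  let P : Int := si.length
  if P = 0 ∨ (sj.length : Int) ≠ P then none
  else
    let fail := buildFail sj
    let text := si ++ PySem.List.slice si none (some (P - 1))  -- si[:P-1]
    kmpRun sj fail text 0 0

-- ===== PRECONDITION & SPEC =====
def Spec_phase_offset (si : List Int) (sj : List Int) (out : Option Int) : Prop := out = phase_offset_alt si sj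
instance (si : List Int) (sj : List Int) (out : Option Int) : Decidable (Spec_phase_offset si sj out) := by unfold Spec_phase_offset; infer_instance

-- ===== CLAIM (what is proved, stated in full; the proofs are below) =====
def Claim_equal_phase_offset : Prop := ∀ (si : List Int) (sj : List Int), Dom_phase_offset si sj → Spec_phase_offset si sj (phase_offset si sj)

-- ===== LEMMAS AND PROOFS =====

-- longest l ≤ |pat| with pat.take l a suffix of s  (the KMP matched-prefix length)
def mml (pat s : List Int) : Nat := Nat.findGreatest (fun l => pat.take l <:+ s) pat.length

-- longest proper border of pat.take k (for k ≥ 1)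
def mbl (pat : List Int) (k : Nat) : Nat := Nat.findGreatest (fun b => pat.take b <:+ pat.take k) (k - 1)

lemma mml_le (pat s : List Int) : mml pat s ≤ pat.length := Nat.findGreatest_le _

lemma mml_sfx (pat s : List Int) : pat.take (mml pat s) <:+ s := by
  unfold mml
  exact Nat.findGreatest_spec (P := fun l => pat.take l <:+ s) (Nat.zero_le _) (by simp)

lemma le_mml (pat s : List Int) {l : Nat} (h1 : l ≤ pat.length) (h2 : pat.take l <:+ s) :
    l ≤ mml pat s := Nat.le_findGreatest h1 h2

lemma mbl_le (pat : List Int) (k : Nat) : mbl pat k ≤ k - 1 := Nat.findGreatest_le _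

lemma mbl_sfx (pat : List Int) (k : Nat) : pat.take (mbl pat k) <:+ pat.take k := by
  unfold mbl
  exact Nat.findGreatest_spec (P := fun b => pat.take b <:+ pat.take k) (Nat.zero_le _) (by simp)

lemma le_mbl (pat : List Int) {k b : Nat} (h1 : b ≤ k - 1) (h2 : pat.take b <:+ pat.take k) :
    b ≤ mbl pat k := Nat.le_findGreatest h1 h2

lemma tk_succ (pat : List Int) {l : Nat} (h : l < pat.length) :
    pat.take (l + 1) = pat.take l ++ [pat.getD l 0] := by
  rw [List.getD_eq_getElem _ _ h]; exact List.take_succ_eq_append_getElem h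

lemma snoc_suffix_snoc (xs s : List Int) (a c : Int) :
    xs ++ [a] <:+ s ++ [c] ↔ xs <:+ s ∧ a = c := by
  constructor
  · rintro ⟨t, ht⟩
    have ht' : (t ++ xs) ++ [a] = s ++ [c] := by simpa [List.append_assoc] using ht
    rcases List.append_inj' ht' rfl with ⟨h1, h2⟩
    exact ⟨⟨t, h1⟩, by simpa using h2⟩
  · rintro ⟨⟨t, ht⟩, rfl⟩
    exact ⟨t, by simp [← ht]⟩

lemma sfx_succ (pat s : List Int) (c : Int) {l : Nat} (h : l < pat.length) :
    (pat.take (l + 1) <:+ s ++ [c]) ↔ (pat.take l <:+ s ∧ pat.getD l 0 = c) := by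
  rw [tk_succ pat h, snoc_suffix_snoc]

lemma take_sfx_le (pat : List Int) {a b : Nat} (ha : a ≤ pat.length) (hb : b ≤ pat.length)
    (hs : pat.take a <:+ pat.take b) : a ≤ b := by
  have := hs.length_le
  rwa [List.length_take_of_le ha, List.length_take_of_le hb] at this

lemma take_sfx_of_le (pat s : List Int) {a b : Nat} (ha : a ≤ pat.length) (hb : b ≤ pat.length)
    (h1 : pat.take a <:+ s) (h2 : pat.take b <:+ s) (hab : a ≤ b) :
    pat.take a <:+ pat.take b :=
  List.suffix_of_suffix_length_le h1 h2
    (by rw [List.length_take_of_le ha, List.length_take_of_le hb]; exact hab)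

lemma mml_congr (pat s t : List Int)
    (h : ∀ l, l ≤ pat.length → ((pat.take l <:+ s) ↔ (pat.take l <:+ t))) :
    mml pat s = mml pat t :=
  le_antisymm (le_mml _ _ (mml_le _ _) ((h _ (mml_le _ _)).mp (mml_sfx _ _)))
              (le_mml _ _ (mml_le _ _) ((h _ (mml_le _ _)).mpr (mml_sfx _ _)))

-- extending the text by one character only looks at the current matched prefix
lemma mml_snoc (pat s : List Int) (c : Int) :
    mml pat (s ++ [c]) = mml pat (pat.take (mml pat s) ++ [c]) := by
  apply mml_congr; intro l hl
  cases l with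
  | zero => simp
  | succ l' =>
    have hl' : l' < pat.length := hl
    rw [sfx_succ pat s c hl', sfx_succ pat _ c hl']
    constructor
    · rintro ⟨h1, h2⟩
      exact ⟨take_sfx_of_le pat s (le_of_lt hl') (mml_le _ _) h1 (mml_sfx _ _)
               (le_mml _ _ (le_of_lt hl') h1), h2⟩
    · rintro ⟨h1, h2⟩
      exact ⟨h1.trans (mml_sfx pat s), h2⟩

-- on a mismatch the matched length can be replaced by its longest proper border
lemma mml_snoc_mismatch (pat : List Int) (c : Int) {k : Nat} (hk0 : k ≠ 0)
    (hk : k < pat.length) (hc : c ≠ pat.getD k 0) :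
    mml pat (pat.take k ++ [c]) = mml pat (pat.take (mbl pat k) ++ [c]) := by
  apply mml_congr; intro l hl
  cases l with
  | zero => simp
  | succ l' =>
    have hl' : l' < pat.length := hl
    rw [sfx_succ pat _ c hl', sfx_succ pat _ c hl']
    constructor
    · rintro ⟨h1, h2⟩
      have hne : l' ≠ k := by rintro rfl; exact hc h2.symm
      have hlk : l' ≤ k := take_sfx_le pat (le_of_lt hl') (le_of_lt hk) h1
      have hbf : l' ≤ mbl pat k := le_mbl pat (by omega) h1
      refine ⟨take_sfx_of_le pat (pat.take k) (le_of_lt hl')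
        (le_trans (mbl_le pat k) (by omega)) h1 (mbl_sfx pat k) hbf, h2⟩
    · rintro ⟨h1, h2⟩
      exact ⟨h1.trans (mbl_sfx pat k), h2⟩

lemma mml_snoc_match (pat : List Int) (c : Int) {k : Nat} (hk : k < pat.length)
    (hc : c = pat.getD k 0) : mml pat (pat.take k ++ [c]) = k + 1 := by
  apply le_antisymm
  · have h := (mml_sfx pat (pat.take k ++ [c])).length_le
    rw [List.length_take_of_le (mml_le _ _), List.length_append,
        List.length_take_of_le (le_of_lt hk)] at h
    simpa using h
  · apply le_mml _ _ hk
    rw [tk_succ pat hk, ← hc]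

lemma mml_single_mismatch (pat : List Int) (c : Int) (hm : 0 < pat.length)
    (hc : c ≠ pat.getD 0 0) : mml pat (pat.take 0 ++ [c]) = 0 := by
  apply Nat.findGreatest_eq_zero_iff.mpr
  intro l hl0 hln hP
  cases l with
  | zero => omega
  | succ l' =>
    rw [sfx_succ pat _ c (by omega : l' < pat.length)] at hP
    obtain ⟨h1, h2⟩ := hP
    rw [List.take_zero, List.suffix_nil, List.take_eq_nil_iff] at h1
    rcases h1 with h1 | h1
    · subst h1; exact hc h2.symm
    · rw [h1] at hm; simp at hm

lemma mml_nil (pat : List Int) (h : pat ≠ []) : mml pat [] = 0 := by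
  apply Nat.findGreatest_eq_zero_iff.mpr
  intro l hl0 _ hP
  rw [List.suffix_nil, List.take_eq_nil_iff] at hP
  rcases hP with hP | hP
  · omega
  · exact h hP

lemma mml_eq_len_iff (pat s : List Int) : mml pat s = pat.length ↔ pat <:+ s := by
  constructor
  · intro h
    have := mml_sfx pat s
    rwa [h, List.take_length] at this
  · intro h
    exact le_antisymm (mml_le _ _) (le_mml _ _ le_rfl (by rwa [List.take_length]))

-- the while/if body computes the matched length of pat against (pat.take k) ++ [c]
lemma kmpStep_spec (pat : List Int) (fail : List Nat) (c : Int) :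
    ∀ k, k < pat.length →
      (∀ j, 1 ≤ j → j ≤ k → fail.getD (j - 1) 0 = mbl pat j) →
      kmpStep pat fail c k = mml pat (pat.take k ++ [c]) := by
  intro k
  induction k using Nat.strong_induction_on with
  | _ k ih =>
    intro hk hfail
    rw [kmpStep]
    by_cases h1 : k ≠ 0 ∧ c ≠ pat.getD k 0
    · rw [if_pos h1]
      have hk1 : 1 ≤ k := Nat.one_le_iff_ne_zero.mpr h1.1
      have hf : fail.getD (k - 1) 0 = mbl pat k := hfail k hk1 le_rfl
      have hlt : mbl pat k < k := lt_of_le_of_lt (mbl_le pat k) (by omega)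
      rw [hf, dif_pos hlt,
          ih (mbl pat k) hlt (lt_trans hlt hk)
            (fun j hj1 hj2 => hfail j hj1 (le_trans hj2 (le_of_lt hlt))),
          mml_snoc_mismatch pat c h1.1 hk h1.2]
    · rw [if_neg h1]
      by_cases h2 : c = pat.getD k 0
      · rw [if_pos h2, mml_snoc_match pat c hk h2]
      · rw [if_neg h2]
        have hk0 : k = 0 := by tauto
        subst hk0
        exact (mml_single_mismatch pat c hk h2).symm

lemma getD_eq_opt (l : List Nat) (j : Nat) : l.getD j 0 = (l[j]?).getD 0 :=
  List.getD_eq_getElem?_getD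

-- mbl computed by one kmpStep from the previous border length
lemma mbl_succ' (pat : List Int) (i : Nat) (h1 : 1 ≤ i) (h2 : i < pat.length) :
    mbl pat (i + 1) = mml pat (pat.take (mbl pat i) ++ [pat.getD i 0]) := by
  apply le_antisymm
  · rcases Nat.eq_zero_or_pos (mbl pat (i + 1)) with h0 | h0
    · omega
    · obtain ⟨b, hb⟩ : ∃ b, mbl pat (i + 1) = b + 1 := ⟨mbl pat (i + 1) - 1, by omega⟩
      have hble : b + 1 ≤ i := by have := mbl_le pat (i + 1); omega
      have hP : pat.take (b + 1) <:+ pat.take (i + 1) := hb ▸ mbl_sfx pat (i + 1)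
      rw [tk_succ pat h2, sfx_succ pat _ _ (by omega : b < pat.length)] at hP
      obtain ⟨hP1, hP2⟩ := hP
      have hbf : b ≤ mbl pat i := le_mbl pat (by omega) hP1
      have hP1' : pat.take b <:+ pat.take (mbl pat i) :=
        take_sfx_of_le pat (pat.take i) (by omega)
          (le_trans (mbl_le pat i) (by omega)) hP1 (mbl_sfx pat i) hbf
      rw [hb]
      exact le_mml _ _ (by omega)
        ((sfx_succ pat _ _ (by omega : b < pat.length)).mpr ⟨hP1', hP2⟩)
  · rcases Nat.eq_zero_or_pos (mml pat (pat.take (mbl pat i) ++ [pat.getD i 0])) with h0 | h0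
    · omega
    · obtain ⟨l, hl⟩ : ∃ l, mml pat (pat.take (mbl pat i) ++ [pat.getD i 0]) = l + 1 :=
        ⟨mml pat (pat.take (mbl pat i) ++ [pat.getD i 0]) - 1, by omega⟩
      have hP : pat.take (l + 1) <:+ pat.take (mbl pat i) ++ [pat.getD i 0] :=
        hl ▸ mml_sfx pat _
      have hllen : l < pat.length := by
        have := mml_le pat (pat.take (mbl pat i) ++ [pat.getD i 0]); omega
      rw [sfx_succ pat _ _ hllen] at hP
      obtain ⟨hP1, hP2⟩ := hP
      have hla : l ≤ mbl pat i :=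
        take_sfx_le pat (by omega) (le_trans (mbl_le pat i) (by omega)) hP1
      have hP1' : pat.take l <:+ pat.take i := hP1.trans (mbl_sfx pat i)
      have : pat.take (l + 1) <:+ pat.take (i + 1) := by
        rw [tk_succ pat h2, sfx_succ pat _ _ hllen]
        exact ⟨hP1', hP2⟩
      rw [hl]
      apply le_mbl pat (by have := mbl_le pat i; omega) this

-- invariant of the failure-table construction loop
lemma buildFail_inv (pat : List Int) (n : Nat) (hn : n ≤ pat.length - 1) (hm : 1 ≤ pat.length) :
    ((List.range' 1 n).foldl (buildStep pat) (List.replicate pat.length 0, 0)).1.length = pat.length ∧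
    ((List.range' 1 n).foldl (buildStep pat) (List.replicate pat.length 0, 0)).2 = mbl pat (n + 1) ∧
    ∀ j, j < pat.length →
      ((List.range' 1 n).foldl (buildStep pat) (List.replicate pat.length 0, 0)).1.getD j 0 =
        if j ≤ n then mbl pat (j + 1) else 0 := by
  induction n with
  | zero =>
    simp only [List.range'_zero, List.foldl_nil]
    refine ⟨by simp, ?_, ?_⟩
    · simp [mbl]
    · intro j hj
      rw [getD_eq_opt, List.getElem?_replicate]
      by_cases hj0 : j = 0
      · subst hj0; simp [mbl, hj]
      · rw [if_pos hj, if_neg (by omega)]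
        rfl
  | succ n ihn =>
    obtain ⟨hL, hK, hE⟩ := ihn (by omega)
    have hmn : n + 2 ≤ pat.length := by omega
    rw [List.range'_1_concat, List.foldl_append, Nat.add_comm 1 n]
    set acc := (List.range' 1 n).foldl (buildStep pat) (List.replicate pat.length 0, 0) with hacc
    have hgd : pat[n + 1]?.getD 0 = pat.getD (n + 1) 0 := List.getD_eq_getElem?_getD.symm
    have hstep : kmpStep pat acc.1 (pat[n + 1]?.getD 0) acc.2 = mbl pat (n + 2) := by
      rw [hK, hgd]
      rw [kmpStep_spec pat acc.1 (pat.getD (n + 1) 0) (mbl pat (n + 1))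
            (by have := mbl_le pat (n + 1); omega)
            (fun j hj1 hj2 => by
              have hmb := mbl_le pat (n + 1)
              have hj : j - 1 < pat.length := by omega
              rw [hE (j - 1) hj, if_pos (by omega),
                  show j - 1 + 1 = j from by omega])]
      exact (mbl_succ' pat (n + 1) (by omega) (by omega)).symm
    simp only [List.foldl_cons, List.foldl_nil, buildStep]
    refine ⟨by simp [hL], by simpa using hstep, ?_⟩
    intro j hj
    rw [getD_eq_opt]
    by_cases hjn : j = n + 1
    · subst hjn
      rw [List.getElem?_set_self (by rw [hL]; omega)]
      simp [hstep]
    · rw [List.getElem?_set_ne (by omega : n + 1 ≠ j), ← getD_eq_opt, hE j hj]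
      by_cases h : j ≤ n
      · rw [if_pos h, if_pos (by omega)]
      · rw [if_neg h, if_neg (by omega)]

lemma buildFail_getD (pat : List Int) (hm : 1 ≤ pat.length) :
    ∀ j, 1 ≤ j → j ≤ pat.length → (buildFail pat).getD (j - 1) 0 = mbl pat j := by
  intro j h1 h2
  obtain ⟨hL, hK, hE⟩ := buildFail_inv pat (pat.length - 1) le_rfl hm
  unfold buildFail
  rw [hE (j - 1) (by omega), if_pos (by omega), show j - 1 + 1 = j from by omega]

-- the scan returns the first end-position j (among the remaining ones) with pat a suffix of text.take j
lemma kmpRun_spec (pat : List Int) (fail : List Nat) (text : List Int)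
    (hfail : ∀ j, 1 ≤ j → j ≤ pat.length → fail.getD (j - 1) 0 = mbl pat j) :
    ∀ (rest : List Int) (i k : Nat), rest = text.drop i → i ≤ text.length →
      k = mml pat (text.take i) → k < pat.length →
      kmpRun pat fail rest i k =
        ((List.range' (i + 1) (text.length - i)).find? (fun j => decide (pat <:+ text.take j))).map
          (fun j => (j : Int) - (pat.length : Int)) := by
  intro rest
  induction rest with
  | nil =>
    intro i k hrest hi hk hklt
    have hlen : text.length - i = 0 := by
      have := congrArg List.length hrest
      simp [List.length_drop] at this
      omega
    rw [hlen]
    rfl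
  | cons x rest ih =>
    intro i k hrest hi hk hklt
    have hilt : i < text.length := by
      by_contra h
      rw [List.drop_eq_nil_of_le (by omega)] at hrest
      exact absurd hrest (by simp)
    have hx : text.drop i = text[i] :: text.drop (i + 1) := List.drop_eq_getElem_cons hilt
    rw [hx] at hrest
    obtain ⟨hx1, hx2⟩ : x = text[i] ∧ rest = text.drop (i + 1) := by
      exact ⟨(List.cons.injEq _ _ _ _ ▸ hrest).1, (List.cons.injEq _ _ _ _ ▸ hrest).2⟩
    have hk' : kmpStep pat fail x k = mml pat (text.take (i + 1)) := by
      rw [kmpStep_spec pat fail x k hklt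
            (fun j hj1 hj2 => hfail j hj1 (le_trans hj2 (le_of_lt hklt))), hk,
          ← mml_snoc pat (text.take i) x, hx1, ← List.take_succ_eq_append_getElem hilt]
    have hrange : List.range' (i + 1) (text.length - i) =
        (i + 1) :: List.range' (i + 2) (text.length - (i + 1)) := by
      rw [show text.length - i = (text.length - (i + 1)) + 1 from by omega]
      rfl
    rw [hrange]
    simp only [kmpRun, hk', List.find?_cons]
    by_cases hfull : mml pat (text.take (i + 1)) = pat.length
    · have hE : pat <:+ text.take (i + 1) := (mml_eq_len_iff pat _).mp hfull
      rw [if_pos hfull]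
      have hd : (decide (pat <:+ text.take (i + 1))) = true := by simp [hE]
      simp only [hd]
      congr 1
      push_cast
      ring
    · have hE : ¬ pat <:+ text.take (i + 1) := fun h => hfull ((mml_eq_len_iff pat _).mpr h)
      rw [if_neg hfull]
      have hd : (decide (pat <:+ text.take (i + 1))) = false := by simp [hE]
      simp only [hd]
      exact ih (i + 1) _ hx2 (by omega) rfl (lt_of_le_of_ne (mml_le _ _) hfull)

lemma phaseLoopA_eq_find? (si sj : List Int) (ks : List Int) :
    phaseLoopA si sj ks = ks.find? (fun k => series_match si sj k) := by
  induction ks with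
  | nil => rfl
  | cons k ks ih =>
    rw [phaseLoopA, List.find?_cons]
    by_cases h : series_match si sj k
    · simp [h]
    · simp [h, ih]

lemma find?_congr_mem {α : Type} (l : List α) (p q : α → Bool) (h : ∀ x ∈ l, p x = q x) :
    l.find? p = l.find? q := by
  induction l with
  | nil => rfl
  | cons a l ih =>
    rw [List.find?_cons, List.find?_cons, h a List.mem_cons_self]
    cases q a
    · exact ih (fun x hx => h x (List.mem_cons_of_mem _ hx))
    · rfl

-- the doubled list indexed below its length wraps modulo the base length
lemma doubled_getD (si : List Int) (i : Nat) (hi : i < 2 * si.length) :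
    (si ++ si).getD i 0 = si.getD (i % si.length) 0 := by
  by_cases hlt : i < si.length
  · rw [Nat.mod_eq_of_lt hlt]
    unfold List.getD
    rw [List.getElem?_append_left hlt]
  · have hle : si.length ≤ i := le_of_not_gt hlt
    unfold List.getD
    rw [List.getElem?_append_right hle, Nat.mod_eq_sub_mod hle,
        Nat.mod_eq_of_lt (by omega)]

-- element t of the window of the doubled list starting at kn
lemma window_getD (si : List Int) (kn t : Nat) (hk : kn < si.length) (ht : t < si.length) :
    (((si ++ si).drop kn).take si.length).getD t 0 = si.getD ((t + kn) % si.length) 0 := by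
  have h1 : kn + t < (si ++ si).length := by simp; omega
  rw [List.getD_eq_getElem _ _ (by simp; omega)]
  rw [List.getElem_take, List.getElem_drop]
  rw [← List.getD_eq_getElem (si ++ si) _ h1, doubled_getD si (kn + t) (by simp at h1 ⊢; omega)]
  rw [Nat.add_comm kn t]

lemma window_length (si : List Int) (kn : Nat) (hk : kn < si.length) :
    (((si ++ si).drop kn).take si.length).length = si.length := by
  simp; omega

-- the window at kn equals sj  iff  sj is the kn-rotation elementwise
lemma rot_iff (si sj : List Int) (kn : Nat) (hk : kn < si.length) (hn : sj.length = si.length) :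
    (((si ++ si).drop kn).take si.length = sj) ↔
      ∀ tn < si.length, sj.getD tn 0 = si.getD ((tn + kn) % si.length) 0 := by
  constructor
  · intro hw tn ht
    rw [← hw, window_getD si kn tn hk ht]
  · intro H
    apply List.ext_getElem (by rw [window_length si kn hk, hn])
    intro i h1 h2
    have hi : i < si.length := by rw [window_length si kn hk] at h1; exact h1
    have := H i hi
    rw [List.getD_eq_getElem sj 0 h2] at this
    rw [← List.getD_eq_getElem _ 0 h1, window_getD si kn i hk hi]
    exact this.symm

-- A's per-offset condition as the window equality
lemma series_match_eq (si sj : List Int) (s : Nat) (hs : s < si.length)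
    (hn : sj.length = si.length) :
    series_match si sj (s : Int) = decide ((((si ++ si).drop s).take si.length) = sj) := by
  have hA : (series_match si sj (s : Int) = true) ↔
      ∀ tn < si.length, sj.getD tn 0 = si.getD ((tn + s) % si.length) 0 := by
    unfold series_match
    rw [if_neg (by omega)]
    rw [List.all_eq_true]
    constructor
    · intro H tn htn
      have hm : (tn : Int) ∈ PySem.List.pyRange 0 (si.length : Int) 1 := by
        rw [PySem.List.mem_pyRange_one]; constructor <;> [positivity; exact_mod_cast htn]
      have := H _ hm
      rw [beq_iff_eq] at this
      rw [show ((tn : Int) + (s : Int)) = (((tn + s : Nat)) : Int) by push_cast; ring,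
          PySem.Int.mod_natCast, PySem.List.pyGetD_natCast, PySem.List.pyGetD_natCast] at this
      exact this
    · intro H t htm
      rw [PySem.List.mem_pyRange_one] at htm
      obtain ⟨tn, rfl⟩ : ∃ tn : Nat, t = (tn : Int) := ⟨t.toNat, (Int.toNat_of_nonneg htm.1).symm⟩
      rw [beq_iff_eq,
          show ((tn : Int) + (s : Int)) = (((tn + s : Nat)) : Int) by push_cast; ring,
          PySem.Int.mod_natCast, PySem.List.pyGetD_natCast, PySem.List.pyGetD_natCast]
      exact H tn (by exact_mod_cast htm.2)
  have hW := rot_iff si sj s hs hn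
  cases hsm : series_match si sj (s : Int)
  · have hnot : ¬ (((si ++ si).drop s).take si.length = sj) := by
      intro hwin
      have ht : series_match si sj (s : Int) = true := hA.mpr (hW.mp hwin)
      rw [hsm] at ht
      exact absurd ht (by simp)
    simp [hnot]
  · have ht : (((si ++ si).drop s).take si.length = sj) := hW.mpr (hA.mp hsm)
    simp [ht]

-- occurrence ending at P+s  iff  window match at s
lemma sfx_take_iff_window (si sj : List Int) (s : Nat) (hs : s < si.length)
    (hn : sj.length = si.length) :
    (sj <:+ (si ++ si).take (si.length + s)) ↔ (((si ++ si).drop s).take si.length = sj) := by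
  have hdlen : (si ++ si).length = 2 * si.length := by simp; omega
  have hylen : ((si ++ si).take (si.length + s)).length = si.length + s :=
    List.length_take_of_le (by omega)
  constructor
  · intro h
    have h2 := List.suffix_iff_eq_drop.mp h
    rw [hylen, hn, show si.length + s - si.length = s from by omega, List.drop_take,
        show si.length + s - s = si.length from by omega] at h2
    exact h2.symm
  · intro h
    rw [show si.length + s = s + si.length from by omega, List.take_add, h]
    exact List.suffix_append _ _

-- ===== VERDICT (by name: the statement is the Claim_ definition above) =====
theorem phase_offset_spec : Claim_equal_phase_offset := by
  intro si sj _
  unfold Spec_phase_offset phase_offset phase_offset_alt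
  by_cases h : (si.length : Int) = 0 ∨ (sj.length : Int) ≠ (si.length : Int)
  · rw [if_pos h, if_pos h]
  · rw [if_neg h, if_neg h]
    rw [not_or, not_ne_iff] at h
    have hP : 1 ≤ si.length := by
      rcases Nat.eq_zero_or_pos si.length with h0 | h0
      · exact absurd (by exact_mod_cast h0 : (si.length : Int) = 0) h.1
      · exact h0
    have hn : sj.length = si.length := by exact_mod_cast h.2
    have hslice : PySem.List.slice si none (some ((si.length : Int) - 1)) = si.take (si.length - 1) := by
      rw [show ((si.length : Int) - 1) = (((si.length - 1 : Nat)) : Int) from by omega]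
      exact PySem.List.slice_to_natCast si (si.length - 1)
    rw [hslice]
    have htlen : (si ++ si.take (si.length - 1)).length = 2 * si.length - 1 := by
      rw [List.length_append, List.length_take]
      omega
    have hbf := buildFail_getD sj (by omega)
    have hmm0 : mml sj ((si ++ si.take (si.length - 1)).take 0) = 0 := by
      rw [List.take_zero]
      exact mml_nil sj (by intro hh; rw [hh] at hn; simp at hn; omega)
    have hrun := kmpRun_spec sj (buildFail sj) (si ++ si.take (si.length - 1)) hbf
      (si ++ si.take (si.length - 1)) 0 0 (by simp) (by omega) hmm0.symm (by omega)
    rw [hrun, Nat.sub_zero, htlen]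
    rw [phaseLoopA_eq_find?, PySem.List.pyRange_zero_natCast, List.find?_map]
    have hsplit : List.range' 1 (2 * si.length - 1) =
        List.range' 1 (si.length - 1) ++ List.range' si.length si.length := by
      have h2 := List.range'_append_1 (s := 1) (m := si.length - 1) (n := si.length)
      rw [show 1 + (si.length - 1) = si.length from by omega,
          show (si.length - 1) + si.length = 2 * si.length - 1 from by omega] at h2
      exact h2.symm
    rw [hsplit, List.find?_append]
    have hnone : (List.range' 1 (si.length - 1)).find?
        (fun j => decide (sj <:+ (si ++ si.take (si.length - 1)).take j)) = none := by
      rw [List.find?_eq_none]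
      intro j hj
      simp only [decide_eq_true_eq]
      intro hsfx
      rcases List.mem_range'.mp hj with ⟨b, hb, rfl⟩
      have h1 := hsfx.length_le
      rw [hn] at h1
      have h2 : ((si ++ si.take (si.length - 1)).take (1 + 1 * b)).length ≤ 1 + 1 * b := by
        rw [List.length_take]
        exact min_le_left _ _
      omega
    rw [hnone, Option.none_or]
    rw [List.range'_eq_map_range, List.find?_map]
    have hpred : ∀ s ∈ List.range si.length,
        ((fun j => decide (sj <:+ (si ++ si.take (si.length - 1)).take j)) ∘ (si.length + ·)) s =
        ((fun k => series_match si sj k) ∘ (fun s : Nat => (s : Int))) s := by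
      intro s hs
      have hsP : s < si.length := List.mem_range.mp hs
      simp only [Function.comp]
      have htext : (si ++ si).take (2 * si.length - 1) = si ++ si.take (si.length - 1) := by
        rw [List.take_append,
            List.take_of_length_le (show si.length ≤ 2 * si.length - 1 from by omega),
            show 2 * si.length - 1 - si.length = si.length - 1 from by omega]
      rw [← htext, List.take_take, show min (si.length + s) (2 * si.length - 1) = si.length + s from by omega]
      rw [series_match_eq si sj s hsP hn, decide_eq_decide]
      exact sfx_take_iff_window si sj s hsP hn
    rw [find?_congr_mem _ _ _ hpred]
    cases hfind : List.find? ((fun k => series_match si sj k) ∘ fun s : Nat => (s : Int))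
        (List.range si.length) with
    | none => simp
    | some a =>
      simp
      omega
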